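-- pv_equiv track=rewrite | github.com/ShaniStaretz-ai/python-basic-lec21-Dec-01-24 | python-basic-final-work2.py | remove_string_duplicate_without_pete
-- ===== SOURCE A (Python) =====
-- def build_dict_for_string_list(l1: list[str])->dict[str, int]:
--     dic1: dict[str, int] = {}
--
--     i:int = 0
--     while i < len(l1):
--         x = l1[i]
--         if dic1.get(x):
--             dic1[x] += 1
--         else:
--             dic1[x] = 1
--         i += 1
--     return dic1
--
-- def remove_string_duplicate_without_pete(l1: list[str]):
--     dict1: dict[str, int] = build_dict_for_string_list(l1)
--     result:list[str] = []
--     i:int = 0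
--     keys:list[str] = list(dict1.keys())
--     while i < len(keys):
--         k = keys[i]
--         if k == "pete":
--             i += 1
--             continue
--         value = dict1.get(k)
--         if value == 1:
--             result.append(k)
--         i += 1
--     return result
-- ===== SOURCE B (Python) =====
-- def remove_string_duplicate_without_pete(l1: list[str]):
--     return [x for x in l1 if x != "pete" and l1.count(x) == 1]
-- ===== Notes on version B (the rewrite author's own statement) =====
-- stated objective: idiomatic
-- what changed: Drops the prebuilt count dictionary and the separate pass over its keys: B is a single comprehension over the original list that decides membership by rescanning the list with list.count (an element of count 1 occurs once, so iterating l1 reproduces A's first-seen key order exactly).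
import Mathlib
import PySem

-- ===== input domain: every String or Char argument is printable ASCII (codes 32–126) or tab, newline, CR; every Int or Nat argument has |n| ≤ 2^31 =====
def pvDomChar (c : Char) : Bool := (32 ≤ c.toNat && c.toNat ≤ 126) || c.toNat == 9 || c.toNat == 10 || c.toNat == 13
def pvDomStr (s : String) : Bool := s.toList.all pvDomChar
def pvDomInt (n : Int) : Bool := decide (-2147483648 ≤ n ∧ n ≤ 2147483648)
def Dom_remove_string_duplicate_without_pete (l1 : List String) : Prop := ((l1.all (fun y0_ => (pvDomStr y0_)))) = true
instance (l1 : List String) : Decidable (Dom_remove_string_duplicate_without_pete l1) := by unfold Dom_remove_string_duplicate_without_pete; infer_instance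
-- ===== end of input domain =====

-- B replaces A's count dictionary + key pass with one comprehension over the original list
-- that rescans it via list.count (idiomatic; not faster).

-- ===== PORT A =====
def build_dict_for_string_list (l1 : List String) : PySem.Dict String Int :=
  l1.foldl (fun dic1 x =>
    if (dic1.get? x).getD 0 ≠ 0 then dic1.insert x ((dic1.get? x).getD 0 + 1)
    else dic1.insert x 1) PySem.Dict.empty

def remove_string_duplicate_without_pete (l1 : List String) : List String :=
  let dict1 := build_dict_for_string_list l1
  let keys := dict1.keys
  keys.foldl (fun result k =>
    if k == "pete" then result
    else if dict1.get? k == some 1 then result ++ [k]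
    else result) []

-- ===== PORT B =====
def remove_string_duplicate_without_pete_alt (l1 : List String) : List String :=
  l1.filter (fun x => !(x == "pete") && (PySem.List.count l1 x == 1))

-- ===== PRECONDITION & SPEC =====
def Spec_remove_string_duplicate_without_pete (l1 : List String) (out : List String) : Prop := out = remove_string_duplicate_without_pete_alt l1
instance (l1 : List String) (out : List String) : Decidable (Spec_remove_string_duplicate_without_pete l1 out) := by unfold Spec_remove_string_duplicate_without_pete; infer_instance

-- ===== CLAIM (what is proved, stated in full; the proofs are below) =====
def Claim_equal_remove_string_duplicate_without_pete : Prop := ∀ (l1 : List String), Dom_remove_string_duplicate_without_pete l1 → Spec_remove_string_duplicate_without_pete l1 (remove_string_duplicate_without_pete l1)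

-- ===== LEMMAS AND PROOFS =====

-- A's build loop body equals the canonical counter step (0 + 1 = 1 in the else branch).
theorem build_dict_eq_counter (l1 : List String) :
    build_dict_for_string_list l1 = PySem.Dict.counter l1 := by
  rw [← PySem.Dict.foldl_insert_getD_add_one_eq_counter]
  unfold build_dict_for_string_list
  congr 1
  funext d x
  rw [PySem.Dict.getD_eq_get?_getD]
  by_cases h : (d.get? x).getD 0 ≠ 0
  · simp [h]
  · simp only [not_not] at h
    simp [h]

-- discard is the identity on a set not containing the element
theorem discard_of_not_mem {α : Type} [BEq α] [LawfulBEq α] (s : PySem.Set α) (x : α)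
    (h : x ∉ s) : PySem.Set.discard s x = s := by
  induction s with
  | nil => rfl
  | cons a t ih =>
    simp only [List.mem_cons, not_or] at h
    simp [PySem.Set.discard, Ne.symm h.1]
    have := ih h.2
    simpa [PySem.Set.discard] using this

-- filtering a predicate that only holds on count-≤-1 elements gives the same
-- result on the dedup (first occurrences) as on the list itself
theorem filter_ofList_eq_filter {α : Type} [BEq α] [LawfulBEq α]
    (p : α → Bool) : ∀ (l : List α), (∀ x, p x = true → l.count x ≤ 1) →
    (PySem.Set.ofList l).filter p = l.filter p := by
  intro l
  induction l with
  | nil => intro _; rfl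
  | cons a xs ih =>
    intro h
    rw [PySem.Set.ofList_cons]
    by_cases hpa : p a = true
    · have hc : (a :: xs).count a ≤ 1 := h a hpa
      simp only [List.count_cons_self] at hc
      have hxa : a ∉ xs := by
        intro hm
        have := List.one_le_count_iff.mpr hm
        omega
      have hset : a ∉ PySem.Set.ofList xs := by
        intro hm; exact hxa ((PySem.Set.mem_ofList _ _).mp hm)
      rw [discard_of_not_mem _ _ hset]
      simp only [List.filter_cons, hpa]
      rw [ih]
      intro x hpx
      have := h x hpx
      rcases eq_or_ne x a with rfl | hne
      · simp [List.count_eq_zero.mpr hxa]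
      · simpa [List.count_cons, Ne.symm hne] using this
    · have hpa' : p a = false := by
        cases hb : p a
        · rfl
        · exact absurd hb hpa
      simp only [List.filter_cons, hpa']
      -- filter p (discard s a) = filter p s since p a = false
      have hdis : ∀ (s : List α), (PySem.Set.discard s a).filter p = s.filter p := by
        intro s
        induction s with
        | nil => rfl
        | cons b t iht =>
          by_cases hba : b = a
          · subst hba
            simp [PySem.Set.discard, hpa'] at *
            simpa [PySem.Set.discard] using iht
          · simp only [PySem.Set.discard, List.filter_cons] at *
            simp [hba, List.filter_cons]
            by_cases hpb : p b = true
            · simpa [hpb, PySem.Set.discard] using congrArg (List.cons b) iht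
            · have : p b = false := by cases hb : p b; rfl; exact absurd hb hpb
              simpa [this, PySem.Set.discard] using iht
      rw [hdis]
      apply ih
      intro x hpx
      have := h x hpx
      rcases eq_or_ne x a with rfl | hne
      · exact absurd hpx (by simp [hpa'])
      · simpa [List.count_cons, Ne.symm hne] using this

theorem get?_counter_of_mem {α : Type} [BEq α] [LawfulBEq α] (l : List α) (x : α)
    (h : x ∈ l) : (PySem.Dict.counter l).get? x = some ((l.count x : Int)) := by
  have hc : (PySem.Dict.counter l).contains x = true := by
    rw [PySem.Dict.contains_counter]
    exact List.contains_iff_mem.mpr h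
  rw [PySem.Dict.contains_eq_isSome_get?] at hc
  obtain ⟨v, hv⟩ := Option.isSome_iff_exists.mp hc
  have := PySem.Dict.getD_counter l x
  rw [PySem.Dict.getD_eq_get?_getD, hv] at this
  simp at this
  rw [hv, this]

-- ===== VERDICT (by name: the statement is the Claim_ definition above) =====
theorem remove_string_duplicate_without_pete_spec : Claim_equal_remove_string_duplicate_without_pete := by
  intro l1 _
  unfold Spec_remove_string_duplicate_without_pete
  unfold remove_string_duplicate_without_pete remove_string_duplicate_without_pete_alt
  rw [build_dict_eq_counter]
  simp only [PySem.Dict.keys_counter]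
  -- flatten the nested-if fold into a single filter over the keys
  have hfold : ∀ (keys : List String),
      keys.foldl (fun result k =>
        if k == "pete" then result
        else if (PySem.Dict.counter l1).get? k == some 1 then result ++ [k]
        else result) [] =
      keys.filter (fun k => !(k == "pete") && ((PySem.Dict.counter l1).get? k == some 1)) := by
    intro keys
    have := PySem.List.foldl_append_if
      (fun k => !(k == "pete") && ((PySem.Dict.counter l1).get? k == some 1)) (id) keys []
    simp only [List.map_id, List.nil_append] at this
    rw [← this]
    congr 1
    funext result k
    by_cases h1 : (k == "pete") = true
    · simp [h1]
    · simp only [Bool.not_eq_true] at h1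
      by_cases h2 : ((PySem.Dict.counter l1).get? k == some 1) = true
      · simp [h1, h2]
      · simp only [Bool.not_eq_true] at h2
        simp [h1, h2]
  rw [hfold]
  -- on members of l1 the key predicate coincides with B's predicate
  have hcong : (PySem.Set.ofList l1).filter
      (fun k => !(k == "pete") && ((PySem.Dict.counter l1).get? k == some 1)) =
      (PySem.Set.ofList l1).filter (fun x => !(x == "pete") && (PySem.List.count l1 x == 1)) := by
    apply List.filter_congr
    intro x hx
    have hmem : x ∈ l1 := (PySem.Set.mem_ofList _ _).mp hx
    rw [get?_counter_of_mem l1 x hmem, PySem.List.count_eq]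
    rcases eq_or_ne (List.count x l1) 1 with h | h
    · simp [h]
    · have h2 : ((List.count x l1 : Int)) ≠ 1 := by exact_mod_cast h
      rw [Bool.eq_iff_iff]
      simp [h, h2]
  rw [hcong]
  apply filter_ofList_eq_filter
  intro x hx
  rw [PySem.List.count_eq] at hx
  simp at hx
  omega
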